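-- pv_equiv track=rewrite | github.com/barbosalucas278/Programacion1.Practicas.UADE.IngeneriaInformatica | Ejercicios/tp_1_funciones/ejercicio_4.py | calcular_vuelto
-- ===== SOURCE A (Python) =====
-- BILLETES_EXISTENTES = [5000,1000,500,200,100,50,10]
--
-- def calcular_vuelto(total, recibido):
--     vuelto = recibido - total
--     vuelto_detallado = []
--     for i in range(len(BILLETES_EXISTENTES)):
--         while vuelto >= BILLETES_EXISTENTES[i]:
--             vuelto = vuelto - BILLETES_EXISTENTES[i]
--             vuelto_detallado.append(BILLETES_EXISTENTES[i])
--     return vuelto_detallado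
-- ===== SOURCE B (Python) =====
-- BILLETES_EXISTENTES = [5000,1000,500,200,100,50,10]
--
-- def calcular_vuelto(total, recibido):
--     vuelto = recibido - total
--     vuelto_detallado = []
--     for billete in BILLETES_EXISTENTES:
--         cantidad = max(0, vuelto // billete)
--         vuelto_detallado += [billete] * cantidad
--         vuelto -= cantidad * billete
--     return vuelto_detallado
-- ===== Notes on version B (the rewrite author's own statement) =====
-- stated objective: faster
-- what changed: Each denomination's repeated-subtraction while loop is replaced by one floor-division computing the count at once, extending the result with [billete]*count.
import Mathlib
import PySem

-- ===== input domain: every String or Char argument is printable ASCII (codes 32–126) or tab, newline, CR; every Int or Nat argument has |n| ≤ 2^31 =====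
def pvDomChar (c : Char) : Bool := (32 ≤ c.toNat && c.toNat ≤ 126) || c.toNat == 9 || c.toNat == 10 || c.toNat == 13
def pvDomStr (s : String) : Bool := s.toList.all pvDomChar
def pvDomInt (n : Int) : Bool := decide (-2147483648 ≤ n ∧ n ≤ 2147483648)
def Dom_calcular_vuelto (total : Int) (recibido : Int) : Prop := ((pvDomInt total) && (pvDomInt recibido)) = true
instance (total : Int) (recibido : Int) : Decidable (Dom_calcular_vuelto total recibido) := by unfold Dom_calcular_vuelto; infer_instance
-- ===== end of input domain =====

-- B replaces A's per-denomination repeated-subtraction while loop by one floor-division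
-- computing the whole count at once (objective: faster).

def BILLETES_EXISTENTES : List Int := [5000, 1000, 500, 200, 100, 50, 10]

-- ===== PORT A =====
-- the inner 'while vuelto >= billete' loop; the '0 < b' conjunct is a totality guard only
-- (every billete in BILLETES_EXISTENTES is positive, so it never changes the behaviour there)
def whileBillete (b : Int) (st : List Int × Int) : List Int × Int :=
  if _h : 0 < b ∧ b ≤ st.2 then
    whileBillete b (st.1 ++ [b], st.2 - b)
  else st
termination_by st.2.toNat
decreasing_by omega

def calcular_vuelto (total : Int) (recibido : Int) : List Int :=
  (BILLETES_EXISTENTES.foldl (fun st b => whileBillete b st) ([], recibido - total)).1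

-- ===== PORT B =====
def calcular_vuelto_alt (total : Int) (recibido : Int) : List Int :=
  (BILLETES_EXISTENTES.foldl
    (fun (st : List Int × Int) b =>
      let cantidad := max 0 (PySem.Int.floordiv st.2 b)
      (st.1 ++ List.replicate cantidad.toNat b, st.2 - cantidad * b))
    ([], recibido - total)).1

-- ===== PRECONDITION & SPEC =====
def Spec_calcular_vuelto (total : Int) (recibido : Int) (out : List Int) : Prop := out = calcular_vuelto_alt total recibido
instance (total : Int) (recibido : Int) (out : List Int) : Decidable (Spec_calcular_vuelto total recibido out) := by unfold Spec_calcular_vuelto; infer_instance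

-- ===== CLAIM (what is proved, stated in full; the proofs are below) =====
def Claim_equal_calcular_vuelto : Prop := ∀ (total : Int) (recibido : Int), Dom_calcular_vuelto total recibido → Spec_calcular_vuelto total recibido (calcular_vuelto total recibido)

-- ===== LEMMAS AND PROOFS =====

theorem whileBillete_eq (b : Int) (hb : 0 < b) (st : List Int × Int) :
    whileBillete b st =
      (st.1 ++ List.replicate (max 0 (PySem.Int.floordiv st.2 b)).toNat b,
       st.2 - max 0 (PySem.Int.floordiv st.2 b) * b) := by
  induction st using whileBillete.induct b with
  | case1 st h ih =>
    rw [whileBillete, dif_pos h, ih]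
    obtain ⟨-, hbv⟩ := h
    set q := PySem.Int.floordiv st.2 b with hq
    have hq1 : 1 ≤ q := by
      rw [hq, PySem.Int.le_floordiv_iff_mul_le hb]; omega
    have hmain : q * b ≤ st.2 ∧ st.2 < (q + 1) * b :=
      (PySem.Int.floordiv_eq_iff_of_pos hb).1 hq.symm
    have hq' : PySem.Int.floordiv (st.2 - b) b = q - 1 := by
      rw [PySem.Int.floordiv_eq_iff_of_pos hb]
      constructor <;> nlinarith [hmain.1, hmain.2]
    rw [hq']
    have hmax1 : max 0 (q - 1) = q - 1 := by omega
    have hmax2 : max 0 q = q := by omega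
    have htn : q.toNat = (q - 1).toNat + 1 := by omega
    rw [hmax1, hmax2, htn, List.replicate_succ, Prod.mk.injEq]
    exact ⟨by simp, by ring⟩
  | case2 st h =>
    rw [whileBillete, dif_neg h]
    have hv : st.2 < b := by
      by_contra hc; exact h ⟨hb, by omega⟩
    have : PySem.Int.floordiv st.2 b < 1 := by
      rw [PySem.Int.floordiv_lt_iff_lt_mul hb]; omega
    have hmax : max 0 (PySem.Int.floordiv st.2 b) = 0 := by omega
    rw [hmax]
    simp

theorem fold_eq (bs : List Int) (hbs : ∀ b ∈ bs, 0 < b) (st : List Int × Int) :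
    bs.foldl (fun st b => whileBillete b st) st =
    bs.foldl (fun (st : List Int × Int) b =>
      let cantidad := max 0 (PySem.Int.floordiv st.2 b)
      (st.1 ++ List.replicate cantidad.toNat b, st.2 - cantidad * b)) st := by
  induction bs generalizing st with
  | nil => rfl
  | cons b bs ih =>
    simp only [List.foldl_cons]
    rw [whileBillete_eq b (hbs b (by simp)), ih (fun x hx => hbs x (by simp [hx]))]

-- ===== VERDICT (by name: the statement is the Claim_ definition above) =====
theorem calcular_vuelto_spec : Claim_equal_calcular_vuelto := by
  intro total recibido _
  unfold Spec_calcular_vuelto calcular_vuelto calcular_vuelto_alt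
  rw [fold_eq]
  intro b hb
  fin_cases hb <;> norm_num
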